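-- pv_equiv track=rewrite | github.com/r-salas/ical-videogames | app/utils.py | replace_short_month
-- ===== SOURCE A (Python) =====
-- def replace_short_month(s):
--     month_dict = {
--         "Jan ": "January ",
--         "Feb ": "February ",
--         "Mar ": "March ",
--         "Apr ": "April ",
--         "May ": "May ",
--         "Jun ": "June ",
--         "Jul ": "July ",
--         "Aug ": "August ",
--         "Sep ": "September ",
--         "Sept ": "September ",
--         "Oct ": "October ",
--         "Nov ": "November ",
--         "Dec ": "December "
--     }
--
--     for short_month, long_month in month_dict.items():
--         s = s.replace(short_month, long_month)
--
--     return s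
-- ===== SOURCE B (Python) =====
-- def replace_short_month(s):
--     months = [
--         ("Jan ", "January "), ("Feb ", "February "), ("Mar ", "March "),
--         ("Apr ", "April "), ("May ", "May "), ("Jun ", "June "),
--         ("Jul ", "July "), ("Aug ", "August "), ("Sep ", "September "),
--         ("Sept ", "September "), ("Oct ", "October "), ("Nov ", "November "),
--         ("Dec ", "December "),
--     ]
--     out = []
--     i = 0
--     n = len(s)
--     while i < n:
--         for short_month, long_month in months:
--             if s.startswith(short_month, i):
--                 out.append(long_month)
--                 i += len(short_month)
--                 break
--         else:
--             out.append(s[i])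
--             i += 1
--     return "".join(out)
-- ===== Notes on version B (the rewrite author's own statement) =====
-- stated objective: alternative
-- what changed: A makes 13 sequential full-string str.replace passes (one per month key); B makes a single left-to-right scan that at each position tries the same 13 literal keys (dict order) and either emits the long month and jumps over the key or copies one character.
import Mathlib
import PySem

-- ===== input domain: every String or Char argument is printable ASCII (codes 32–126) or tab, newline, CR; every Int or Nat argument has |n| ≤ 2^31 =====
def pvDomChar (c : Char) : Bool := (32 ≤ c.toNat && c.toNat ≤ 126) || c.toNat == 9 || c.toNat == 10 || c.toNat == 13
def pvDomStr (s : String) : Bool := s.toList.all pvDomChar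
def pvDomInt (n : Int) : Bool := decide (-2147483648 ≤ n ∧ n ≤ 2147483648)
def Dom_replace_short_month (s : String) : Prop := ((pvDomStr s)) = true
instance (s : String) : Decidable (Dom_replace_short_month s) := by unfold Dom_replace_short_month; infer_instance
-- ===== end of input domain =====

-- B replaces A's 13 sequential full-string `str.replace` passes by ONE left-to-right scan that
-- tries the same 13 literal keys (in dict order) at each position; same return value, different traversal.

-- ===== PORT A =====
-- the dict literal of A, iterated via .items() in insertion order
def pvMonthsS : List (String × String) :=
  [("Jan ", "January "), ("Feb ", "February "), ("Mar ", "March "),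
   ("Apr ", "April "), ("May ", "May "), ("Jun ", "June "),
   ("Jul ", "July "), ("Aug ", "August "), ("Sep ", "September "),
   ("Sept ", "September "), ("Oct ", "October "), ("Nov ", "November "),
   ("Dec ", "December ")]

def replace_short_month (s : String) : String :=
  pvMonthsS.foldl (fun t kv => PySem.Str.replace t kv.1 kv.2) s

-- ===== PORT B =====
-- B's table of (short, long) pairs, as char lists
def pvMonths : List (List Char × List Char) :=
  [("Jan ".toList, "January ".toList), ("Feb ".toList, "February ".toList),
   ("Mar ".toList, "March ".toList), ("Apr ".toList, "April ".toList),
   ("May ".toList, "May ".toList), ("Jun ".toList, "June ".toList),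
   ("Jul ".toList, "July ".toList), ("Aug ".toList, "August ".toList),
   ("Sep ".toList, "September ".toList), ("Sept ".toList, "September ".toList),
   ("Oct ".toList, "October ".toList), ("Nov ".toList, "November ".toList),
   ("Dec ".toList, "December ".toList)]

-- Source B's inner `for … if s.startswith(k, i) … break / else`: first key matching at the current position
def pvFirstMatch (ks : List (List Char × List Char)) (s : List Char) : Option (List Char × Nat) :=
  ks.findSome? (fun kv => if kv.1.isPrefixOf s then some (kv.2, kv.1.length) else none)

-- Source B's while loop: emit the long form and jump over the key, or copy one char
def pvScan (ks : List (List Char × List Char)) : List Char → List Char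
  | [] => []
  | c :: cs =>
    match pvFirstMatch ks (c :: cs) with
    | some (v, n) => v ++ pvScan ks (cs.drop (n - 1))
    | none => c :: pvScan ks cs
  termination_by s => s.length
  decreasing_by all_goals simp [List.length_drop]

def replace_short_month_alt (s : String) : String :=
  String.ofList (pvScan pvMonths s.toList)

-- ===== PRECONDITION & SPEC =====
def Spec_replace_short_month (s : String) (out : String) : Prop := out = replace_short_month_alt s
instance (s : String) (out : String) : Decidable (Spec_replace_short_month s out) := by unfold Spec_replace_short_month; infer_instance

-- ===== CLAIM (what is proved, stated in full; the proofs are below) =====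
def Claim_equal_replace_short_month : Prop := ∀ (s : String), Dom_replace_short_month s → Spec_replace_short_month s (replace_short_month s)

-- ===== LEMMAS AND PROOFS =====

def pvUp (c : Char) : Bool := 'A' ≤ c && c ≤ 'Z'

-- an uppercase letter followed by non-uppercase characters (all keys and values of the table)
def pvWord : List Char → Bool
  | [] => false
  | c :: t => pvUp c && t.all (fun d => !pvUp d)

-- side conditions under which one more sequential replace equals extending the scan key list
def pvGood (K : List (List Char × List Char)) (k v : List Char) : Bool :=
  pvWord k && pvWord v &&
    K.all (fun kv => pvWord kv.1 && pvWord kv.2 && !(k.isPrefixOf kv.2) && !(kv.2.isPrefixOf k))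

def pvGoodChain (K : List (List Char × List Char)) : List (List Char × List Char) → Bool
  | [] => true
  | p :: r => pvGood K p.1 p.2 && pvGoodChain (K ++ [p]) r

-- ---- facts about PySem.Chars.replace ----

lemma pv_go_acc (old new : List Char) : ∀ (f : Nat) (l acc : List Char),
    PySem.Chars.replace.go old new f l acc = acc.reverse ++ PySem.Chars.replace.go old new f l [] := by
  intro f
  induction f with
  | zero => intro l acc; cases l <;> simp [PySem.Chars.replace.go]
  | succ f ih =>
    intro l acc
    cases l with
    | nil => simp [PySem.Chars.replace.go]
    | cons c t =>
      rw [PySem.Chars.replace.go, PySem.Chars.replace.go]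
      split
      · rw [ih _ (new.reverse ++ acc), ih _ (new.reverse ++ ([] : List Char))]
        simp
      · rw [ih _ (c :: acc), ih _ [c]]
        simp

lemma pv_go_fuel (old new : List Char) (hk : old ≠ []) : ∀ (n f f' : Nat) (l : List Char),
    l.length ≤ n → l.length ≤ f → l.length ≤ f' →
    PySem.Chars.replace.go old new f l [] = PySem.Chars.replace.go old new f' l [] := by
  intro n
  induction n with
  | zero =>
    intro f f' l hn _ _
    have : l = [] := List.eq_nil_of_length_eq_zero (Nat.le_zero.mp hn)
    subst this
    cases f <;> cases f' <;> simp [PySem.Chars.replace.go]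
  | succ n ih =>
    intro f f' l hn hf hf'
    cases l with
    | nil => cases f <;> cases f' <;> simp [PySem.Chars.replace.go]
    | cons c t =>
      simp only [List.length_cons] at hn hf hf'
      obtain ⟨f1, rfl⟩ : ∃ f1, f = f1 + 1 := ⟨f - 1, by omega⟩
      obtain ⟨f2, rfl⟩ : ∃ f2, f' = f2 + 1 := ⟨f' - 1, by omega⟩
      rw [PySem.Chars.replace.go, PySem.Chars.replace.go]
      have hkl : 1 ≤ old.length := by
        cases old with
        | nil => exact absurd rfl hk
        | cons a b => simp
      split
      · rw [pv_go_acc, pv_go_acc old new f2]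
        congr 1
        exact ih f1 f2 _ (by simp [List.length_drop]; omega) (by simp [List.length_drop]; omega)
          (by simp [List.length_drop]; omega)
      · rw [pv_go_acc, pv_go_acc old new f2]
        congr 1
        exact ih f1 f2 t (by omega) (by omega) (by omega)

lemma pv_rep_nil (k v : List Char) (hk : k ≠ []) : PySem.Chars.replace [] k v = [] := by
  cases k with
  | nil => exact absurd rfl hk
  | cons a b => simp [PySem.Chars.replace, PySem.Chars.replace.go]

lemma pv_rep_cons_pos (k v : List Char) (c : Char) (t : List Char) (h : k <+: c :: t) (hk : k ≠ []) :
    PySem.Chars.replace (c :: t) k v = v ++ PySem.Chars.replace (List.drop k.length (c :: t)) k v := by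
  have hke : k.isEmpty = false := by cases k with | nil => exact absurd rfl hk | cons a b => rfl
  have hkl : 1 ≤ k.length := by cases k with | nil => exact absurd rfl hk | cons a b => simp
  rw [PySem.Chars.replace, PySem.Chars.replace, hke]
  simp only [Bool.false_eq_true, if_false, List.length_cons]
  rw [PySem.Chars.replace.go, if_pos (List.isPrefixOf_iff_prefix.mpr h)]
  rw [pv_go_acc]
  simp only [List.append_nil, List.reverse_reverse]
  congr 1
  exact pv_go_fuel k v hk t.length _ _ _ (by simp [List.length_drop]; omega)
    (by simp [List.length_drop]; omega) le_rfl

lemma pv_rep_cons_neg (k v : List Char) (c : Char) (t : List Char) (h : ¬ k <+: c :: t) :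
    PySem.Chars.replace (c :: t) k v = c :: PySem.Chars.replace t k v := by
  have hk : k ≠ [] := by rintro rfl; exact h (List.nil_prefix)
  have hke : k.isEmpty = false := by cases k with | nil => exact absurd rfl hk | cons a b => rfl
  rw [PySem.Chars.replace, PySem.Chars.replace, hke]
  simp only [Bool.false_eq_true, if_false, List.length_cons]
  rw [PySem.Chars.replace.go,
    if_neg (by rw [List.isPrefixOf_iff_prefix]; simpa using h)]
  rw [pv_go_acc]
  simp

-- ---- facts about pvScan ----

lemma pv_word_not_prefix_low (w : List Char) (hw : pvWord w = true) (a : Char) (ha : pvUp a = false)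
    (l : List Char) : ¬ w <+: a :: l := by
  cases w with
  | nil => simp [pvWord] at hw
  | cons u w' =>
    intro hp
    obtain ⟨rfl, -⟩ := List.cons_prefix_cons.mp hp
    simp [pvWord, ha] at hw

lemma pv_scan_nil (s : List Char) : pvScan [] s = s := by
  induction s with
  | nil => rw [pvScan]
  | cons c cs ih =>
    rw [pvScan]
    simp only [pvFirstMatch, List.findSome?_nil]
    rw [ih]

-- the scan copies verbatim any prefix without uppercase characters
lemma pv_scan_copy (K : List (List Char × List Char)) (hK : ∀ kv ∈ K, pvWord kv.1 = true) :
    ∀ (p cs : List Char), p.all (fun d => !pvUp d) = true → p <+: cs →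
      pvScan K cs = p ++ pvScan K (cs.drop p.length) := by
  intro p
  induction p with
  | nil => intro cs _ _; simp
  | cons a rest ih =>
    intro cs hall hpre
    obtain ⟨t, rfl⟩ := hpre
    simp only [List.all_cons, Bool.and_eq_true, Bool.not_eq_true'] at hall
    have hnone : pvFirstMatch K (a :: (rest ++ t)) = none := by
      rw [pvFirstMatch, List.findSome?_eq_none_iff]
      intro kv hkv
      rw [if_neg]
      rw [List.isPrefixOf_iff_prefix]
      exact pv_word_not_prefix_low kv.1 (hK kv hkv) a hall.1 _
    rw [List.cons_append, pvScan, hnone]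
    simp only [List.cons_append, List.length_cons, List.drop_succ_cons]
    rw [ih (rest ++ t) hall.2 (List.prefix_append rest t)]

-- the scan creates no new occurrence of an uppercase-free pattern at the front
lemma pv_scan_no_new (K : List (List Char × List Char))
    (hK : ∀ kv ∈ K, pvWord kv.1 = true ∧ pvWord kv.2 = true) :
    ∀ (p : List Char), p.all (fun d => !pvUp d) = true →
      ∀ cs, ¬ p <+: cs → ¬ p <+: pvScan K cs := by
  intro p
  induction p with
  | nil => intro _ cs h; exact absurd (List.nil_prefix) h
  | cons a rest ih =>
    intro hall cs hncs hpre
    simp only [List.all_cons, Bool.and_eq_true, Bool.not_eq_true'] at hall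
    cases cs with
    | nil => rw [pvScan] at hpre; simp at hpre
    | cons c cs' =>
      cases hm : pvFirstMatch K (c :: cs') with
      | some p' =>
        obtain ⟨v', n'⟩ := p'
        rw [pvScan, hm] at hpre
        obtain ⟨kv, hkv, hif⟩ := List.exists_of_findSome?_eq_some hm
        have hv' : v' = kv.2 := by
          by_cases hp : kv.1.isPrefixOf (c :: cs') = true
          · rw [if_pos hp] at hif; exact (congrArg Prod.fst (Option.some.inj hif)).symm
          · rw [if_neg hp] at hif; exact absurd hif (by simp)
        have hw : pvWord v' = true := hv' ▸ (hK kv hkv).2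
        cases hv : v' with
        | nil => rw [hv] at hw; simp [pvWord] at hw
        | cons u w' =>
          rw [hv] at hpre
          obtain ⟨rfl, -⟩ := List.cons_prefix_cons.mp hpre
          rw [hv, pvWord] at hw
          simp [hall.1] at hw
      | none =>
        rw [pvScan, hm] at hpre
        obtain ⟨rfl, hrest⟩ := List.cons_prefix_cons.mp hpre
        have hr : ¬ rest <+: cs' := fun hh => hncs (List.cons_prefix_cons.mpr ⟨rfl, hh⟩)
        exact ih hall.2 cs' hr hrest

lemma pv_rep_append_low (k v : List Char) (hk : pvWord k = true) :
    ∀ (p X : List Char), p.all (fun d => !pvUp d) = true →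
      PySem.Chars.replace (p ++ X) k v = p ++ PySem.Chars.replace X k v := by
  intro p
  induction p with
  | nil => intro X _; simp
  | cons a rest ih =>
    intro X hall
    simp only [List.all_cons, Bool.and_eq_true, Bool.not_eq_true'] at hall
    rw [List.cons_append,
      pv_rep_cons_neg k v a (rest ++ X) (pv_word_not_prefix_low k hk a hall.1 _),
      ih X hall.2]
    rfl

lemma pv_rep_append_word (k v w X : List Char) (hw : pvWord w = true) (hk : pvWord k = true)
    (h1 : ¬ k <+: w) (h2 : ¬ w <+: k) :
    PySem.Chars.replace (w ++ X) k v = w ++ PySem.Chars.replace X k v := by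
  cases w with
  | nil => simp [pvWord] at hw
  | cons u rest =>
    have hnp : ¬ k <+: (u :: rest) ++ X := by
      intro hp
      rcases List.prefix_or_prefix_of_prefix hp (List.prefix_append (u :: rest) X) with h | h
      · exact h1 h
      · exact h2 h
    rw [List.cons_append, pv_rep_cons_neg k v u (rest ++ X) (by simpa using hnp)]
    rw [pvWord] at hw
    simp only [Bool.and_eq_true] at hw
    rw [pv_rep_append_low k v hk rest X hw.2]
    rfl

-- ---- the main lemma: one more sequential replace = scan with one more key ----

lemma pv_main (k v : List Char) (K : List (List Char × List Char)) (hG : pvGood K k v = true) :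
    ∀ (n : Nat) (s : List Char), s.length ≤ n →
      PySem.Chars.replace (pvScan K s) k v = pvScan (K ++ [(k, v)]) s := by
  simp only [pvGood, Bool.and_eq_true, List.all_eq_true, Bool.not_eq_true'] at hG
  obtain ⟨⟨hk, hv⟩, hKall⟩ := hG
  have hkne : k ≠ [] := by intro e; rw [e] at hk; simp [pvWord] at hk
  have hKkeys : ∀ kv ∈ K, pvWord kv.1 = true := fun kv hkv => (hKall kv hkv).1.1.1
  have hKwords : ∀ kv ∈ K, pvWord kv.1 = true ∧ pvWord kv.2 = true :=
    fun kv hkv => (hKall kv hkv).1.1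
  intro n
  induction n with
  | zero =>
    intro s hs
    have : s = [] := List.eq_nil_of_length_eq_zero (Nat.le_zero.mp hs)
    subst this
    rw [pvScan, pvScan]
    exact pv_rep_nil k v hkne
  | succ n ih =>
    intro s hs
    cases s with
    | nil =>
      rw [pvScan, pvScan]
      exact pv_rep_nil k v hkne
    | cons c cs =>
      simp only [List.length_cons] at hs
      cases hm : pvFirstMatch K (c :: cs) with
      | some pr =>
        obtain ⟨v', n'⟩ := pr
        obtain ⟨kv, hkv, hif⟩ := List.exists_of_findSome?_eq_some hm
        have hpT : kv.1.isPrefixOf (c :: cs) = true := by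
          by_cases hp : kv.1.isPrefixOf (c :: cs) = true
          · exact hp
          · rw [if_neg hp] at hif; exact absurd hif (by simp)
        rw [if_pos hpT] at hif
        have hv'1 : kv.2 = v' := congrArg Prod.fst (Option.some.inj hif)
        have hw2 : pvWord v' = true := hv'1 ▸ (hKwords kv hkv).2
        have hnkp : ¬ k <+: v' := by
          intro hp
          have h2 := (hKall kv hkv).1.2
          rw [hv'1, List.isPrefixOf_iff_prefix.mpr hp] at h2
          exact Bool.true_eq_false.mp h2
        have hnvk : ¬ v' <+: k := by
          intro hp
          have h2 := (hKall kv hkv).2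
          rw [hv'1, List.isPrefixOf_iff_prefix.mpr hp] at h2
          exact Bool.true_eq_false.mp h2
        have hm' : pvFirstMatch (K ++ [(k, v)]) (c :: cs) = some (v', n') := by
          rw [pvFirstMatch, List.findSome?_append]
          rw [pvFirstMatch] at hm
          rw [hm]
          rfl
        rw [pvScan, hm, pvScan, hm']
        dsimp only
        rw [pv_rep_append_word k v v' _ hw2 hk hnkp hnvk]
        rw [ih (cs.drop (n' - 1)) (by simp [List.length_drop]; omega)]
      | none =>
        by_cases hkp : k <+: c :: cs
        · cases k with
          | nil => exact absurd rfl hkne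
          | cons u ktail =>
            obtain ⟨rfl, hkt⟩ := List.cons_prefix_cons.mp hkp
            have hktlow : ktail.all (fun d => !pvUp d) = true := by
              rw [pvWord, Bool.and_eq_true] at hk
              exact hk.2
            have hmK' : pvFirstMatch (K ++ [(u :: ktail, v)]) (u :: cs) = some (v, ktail.length + 1) := by
              rw [pvFirstMatch, List.findSome?_append]
              rw [pvFirstMatch] at hm
              rw [hm]
              simp [List.isPrefixOf_iff_prefix, hkp]
            rw [pvScan, hm, pvScan, hmK']
            dsimp only
            rw [pv_scan_copy K hKkeys ktail cs hktlow hkt]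
            rw [pv_rep_cons_pos (u :: ktail) v u (ktail ++ pvScan K (cs.drop ktail.length))
                (List.prefix_append _ _) hkne]
            have hdrop : List.drop (u :: ktail).length
                (u :: (ktail ++ pvScan K (cs.drop ktail.length)))
                = pvScan K (cs.drop ktail.length) := by
              simp only [List.length_cons, List.drop_succ_cons]
              exact List.drop_left
            rw [hdrop, ih (cs.drop ktail.length) (by simp [List.length_drop]; omega)]
            simp
        · have hnp : ¬ k <+: c :: pvScan K cs := by
            cases k with
            | nil => exact absurd rfl hkne
            | cons u ktail =>
              intro hp
              obtain ⟨rfl, hkt⟩ := List.cons_prefix_cons.mp hp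
              have hnkt : ¬ ktail <+: cs := fun hh => hkp (List.cons_prefix_cons.mpr ⟨rfl, hh⟩)
              have hktlow : ktail.all (fun d => !pvUp d) = true := by
                rw [pvWord, Bool.and_eq_true] at hk
                exact hk.2
              exact pv_scan_no_new K hKwords ktail hktlow cs hnkt hkt
          have hm' : pvFirstMatch (K ++ [(k, v)]) (c :: cs) = none := by
            rw [pvFirstMatch, List.findSome?_append]
            rw [pvFirstMatch] at hm
            rw [hm]
            simp [List.isPrefixOf_iff_prefix, hkp]
          rw [pvScan, hm, pvScan, hm']
          dsimp only
          rw [pv_rep_cons_neg k v c (pvScan K cs) hnp, ih cs (by omega)]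

lemma pv_fold_scan (cs : List Char) :
    ∀ (rest K : List (List Char × List Char)), pvGoodChain K rest = true →
      rest.foldl (fun l kv => PySem.Chars.replace l kv.1 kv.2) (pvScan K cs)
        = pvScan (K ++ rest) cs := by
  intro rest
  induction rest with
  | nil => intro K _; simp
  | cons p r ih =>
    intro K hch
    rw [pvGoodChain, Bool.and_eq_true] at hch
    rw [List.foldl_cons, pv_main p.1 p.2 K hch.1 cs.length cs le_rfl, ih (K ++ [p]) hch.2]
    simp

lemma pv_toList_foldl : ∀ (ps : List (String × String)) (t : String),
    (ps.foldl (fun t kv => PySem.Str.replace t kv.1 kv.2) t).toList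
      = (ps.map (fun kv => (kv.1.toList, kv.2.toList))).foldl
          (fun l kv => PySem.Chars.replace l kv.1 kv.2) t.toList := by
  intro ps
  induction ps with
  | nil => intro t; simp
  | cons p r ih =>
    intro t
    rw [List.foldl_cons, List.map_cons, List.foldl_cons, ih]
    simp

-- ===== VERDICT (by name: the statement is the Claim_ definition above) =====
theorem replace_short_month_spec : Claim_equal_replace_short_month := by
  intro s _
  unfold Spec_replace_short_month replace_short_month replace_short_month_alt
  have h1 := pv_toList_foldl pvMonthsS s
  have h2 : pvMonthsS.map (fun kv => (kv.1.toList, kv.2.toList)) = pvMonths := by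
    rfl
  rw [h2] at h1
  have h4 := pv_fold_scan s.toList pvMonths [] (by decide)
  rw [pv_scan_nil] at h4
  simp only [List.nil_append] at h4
  have h5 : (pvMonthsS.foldl (fun t kv => PySem.Str.replace t kv.1 kv.2) s).toList
      = pvScan pvMonths s.toList := by rw [h1, h4]
  rw [← h5, String.ofList_toList]
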